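-- pv_equiv track=rewrite | github.com/jpCaglianone/AT_PB_CienciaDados | tp2_pb/6_4.py | calcular_combinacoes_pinturas
-- ===== SOURCE A (Python) =====
-- def calcular_combinacoes_pinturas(n_cadeiras, n_cores):
--    dp = [[0 for _ in range(n_cores)] for _ in range(n_cadeiras)]
--    for cor in range(n_cores):
--        dp[0][cor] = 1
--    for i in range(1, n_cadeiras):
--        for cor_atual in range(n_cores):
--            for cor_anterior in range(n_cores):
--                if cor_atual != cor_anterior:
--                    dp[i][cor_atual] += dp[i - 1][cor_anterior]
--    return sum(dp[n_cadeiras - 1])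
-- ===== SOURCE B (Python) =====
-- def calcular_combinacoes_pinturas(n_cadeiras, n_cores):
--     if n_cores <= 0:
--         return 0
--     return n_cores * (n_cores - 1) ** (n_cadeiras - 1)
-- ===== Notes on version B (the rewrite author's own statement) =====
-- stated objective: faster
-- what changed: Replaced the O(n_cadeiras*n_cores^2) DP table with the closed form n_cores*(n_cores-1)^(n_cadeiras-1) (0 when there are no colors), computed with fast integer exponentiation.
import Mathlib
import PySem

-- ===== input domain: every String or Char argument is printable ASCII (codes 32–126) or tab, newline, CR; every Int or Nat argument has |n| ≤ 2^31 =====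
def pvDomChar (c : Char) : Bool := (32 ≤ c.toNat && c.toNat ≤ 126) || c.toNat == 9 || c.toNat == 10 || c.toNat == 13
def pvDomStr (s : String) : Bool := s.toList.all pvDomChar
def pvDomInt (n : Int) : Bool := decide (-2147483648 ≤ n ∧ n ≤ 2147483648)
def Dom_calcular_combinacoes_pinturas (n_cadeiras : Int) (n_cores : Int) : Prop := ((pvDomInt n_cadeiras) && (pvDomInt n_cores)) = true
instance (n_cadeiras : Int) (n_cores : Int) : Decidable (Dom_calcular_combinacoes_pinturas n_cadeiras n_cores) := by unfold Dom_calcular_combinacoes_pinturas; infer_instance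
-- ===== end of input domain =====

-- B replaces A's O(n_cadeiras*n_cores^2) DP table with the closed form
-- n_cores*(n_cores-1)^(n_cadeiras-1) (0 when n_cores ≤ 0): asymptotically faster, same values.


-- ===== PORT A =====
-- dp[i][j] read / write helpers (Python list indexing; indices produced by range() are ≥ 0,
-- and on Pre_ every access is in range, so getD/set are exact here)
def pvGetCell (dp : List (List Int)) (i j : Nat) : Int := (dp.getD i []).getD j 0

def pvSetCell (dp : List (List Int)) (i j : Nat) (v : Int) : List (List Int) :=
  dp.set i ((dp.getD i []).set j v)


-- dp = [[0]*n_cores ...]; for cor in range(n_cores): dp[0][cor] = 1; triple loop; sum(dp[n_cadeiras-1])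
def calcular_combinacoes_pinturas (n_cadeiras : Int) (n_cores : Int) : Int :=
  let dp : List (List Int) :=
    (PySem.List.pyRange 0 n_cadeiras 1).map (fun _ =>
      (PySem.List.pyRange 0 n_cores 1).map (fun _ => (0 : Int)))
  let dp := (PySem.List.pyRange 0 n_cores 1).foldl
    (fun dp cor => pvSetCell dp 0 cor.toNat 1) dp
  let dp := (PySem.List.pyRange 1 n_cadeiras 1).foldl (fun dp i =>
    (PySem.List.pyRange 0 n_cores 1).foldl (fun dp cor_atual =>
      (PySem.List.pyRange 0 n_cores 1).foldl (fun dp cor_anterior =>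
        if cor_atual ≠ cor_anterior then
          pvSetCell dp i.toNat cor_atual.toNat
            (pvGetCell dp i.toNat cor_atual.toNat +
             pvGetCell dp (i - 1).toNat cor_anterior.toNat)
        else dp) dp) dp) dp
  (dp.getD (n_cadeiras - 1).toNat []).foldl (· + ·) 0


-- ===== PORT B =====
-- (n_cadeiras - 1).toNat is exact: Pre_ gives 1 ≤ n_cadeiras, so the Python exponent is ≥ 0
def calcular_combinacoes_pinturas_alt (n_cadeiras : Int) (n_cores : Int) : Int :=
  if n_cores ≤ 0 then 0
  else n_cores * (n_cores - 1) ^ (n_cadeiras - 1).toNat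


-- ===== PRECONDITION & SPEC =====
-- Pre_ excludes n_cadeiras ≤ 0, on which A raises IndexError (dp[0] or dp[-1] on an empty dp).
def Pre_calcular_combinacoes_pinturas (n_cadeiras : Int) (n_cores : Int) : Prop :=
  1 ≤ n_cadeiras

instance (n_cadeiras : Int) (n_cores : Int) : Decidable (Pre_calcular_combinacoes_pinturas n_cadeiras n_cores) := by
  unfold Pre_calcular_combinacoes_pinturas; infer_instance

def pvWitness_calcular_combinacoes_pinturas : Int × Int := (3, 2)

def Spec_calcular_combinacoes_pinturas (n_cadeiras : Int) (n_cores : Int) (out : Int) : Prop := out = calcular_combinacoes_pinturas_alt n_cadeiras n_cores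
instance (n_cadeiras : Int) (n_cores : Int) (out : Int) : Decidable (Spec_calcular_combinacoes_pinturas n_cadeiras n_cores out) := by unfold Spec_calcular_combinacoes_pinturas; infer_instance

-- ===== CLAIM (what is proved, stated in full; the proofs are below) =====
def Claim_equal_calcular_combinacoes_pinturas : Prop := ∀ (n_cadeiras : Int) (n_cores : Int), Dom_calcular_combinacoes_pinturas n_cadeiras n_cores → Pre_calcular_combinacoes_pinturas n_cadeiras n_cores → Spec_calcular_combinacoes_pinturas n_cadeiras n_cores (calcular_combinacoes_pinturas n_cadeiras n_cores)

-- ===== LEMMAS AND PROOFS =====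
-- basic facts
theorem pv_length_setCell (dp : List (List Int)) (i j : Nat) (v : Int) :
    (pvSetCell dp i j v).length = dp.length := by simp [pvSetCell]

theorem pv_getD_set_self (dp : List (List Int)) (i : Nat) (r : List Int) (h : i < dp.length) :
    (dp.set i r).getD i [] = r := by
  simp [List.getD, List.getElem?_set_self, h]

theorem pv_getD_setCell_self (dp : List (List Int)) (i j : Nat) (v : Int) (h : i < dp.length) :
    (pvSetCell dp i j v).getD i [] = (dp.getD i []).set j v := pv_getD_set_self _ _ _ h

theorem pv_set_getD_self (dp : List (List Int)) (i : Nat) (h : i < dp.length) :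
    dp.set i (dp.getD i []) = dp := by
  rw [List.getD_eq_getElem _ _ h]; exact List.set_getElem_self h

theorem pv_setCell_setCell (dp : List (List Int)) (i j : Nat) (v w : Int)
    (hi : i < dp.length) :
    pvSetCell (pvSetCell dp i j v) i j w = pvSetCell dp i j w := by
  simp [pvSetCell, List.getD, hi, List.set_set]

theorem pv_getCell_setCell_self (dp : List (List Int)) (i j : Nat) (v : Int)
    (hi : i < dp.length) (hj : j < (dp.getD i []).length) :
    pvGetCell (pvSetCell dp i j v) i j = v := by
  have hj' : j < dp[i].length := by simpa [List.getD, hi] using hj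
  simp [pvGetCell, pvSetCell, List.getD, hi, hj']

theorem pv_getCell_setCell_ne_row (dp : List (List Int)) (i i' j j' : Nat) (v : Int) (h : i' ≠ i) :
    pvGetCell (pvSetCell dp i j v) i' j' = pvGetCell dp i' j' := by
  simp [pvGetCell, pvSetCell, List.getD, List.getElem?_set_ne (Ne.symm h)]

-- take of a set at position j
theorem pv_take_set_succ (r : List Int) (j : Nat) (w : Int) (h : j < r.length) :
    (r.set j w).take (j+1) = r.take j ++ [w] := by
  rw [List.set_eq_take_append_cons_drop, if_pos h]
  rw [List.take_append]
  simp [List.length_take, Nat.min_eq_left (Nat.le_of_lt h), List.take_succ_cons]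

-- number of previous colours different from c in range(k)
theorem pv_countP_ne (k c : Int) (hc0 : 0 ≤ c) (hck : c < k) :
    ((PySem.List.pyRange 0 k 1).countP (fun cb => c != cb) : Int) = k - 1 := by
  have hmem : c ∈ PySem.List.pyRange 0 k 1 := by
    rw [PySem.List.mem_pyRange_one]; omega
  have hcount : (PySem.List.pyRange 0 k 1).count c = 1 :=
    List.count_eq_one_of_mem (PySem.List.nodup_pyRange_one 0 k) hmem
  have hlen : (PySem.List.pyRange 0 k 1).length = k.toNat := by simpa using PySem.List.length_pyRange_one 0 k
  have hsplit := List.length_eq_countP_add_countP (fun cb => cb == c) (l := PySem.List.pyRange 0 k 1)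
  have hcp : (PySem.List.pyRange 0 k 1).countP (fun cb => cb == c) = 1 := hcount
  have heq : (PySem.List.pyRange 0 k 1).countP (fun cb => c != cb)
      = (PySem.List.pyRange 0 k 1).countP (fun cb => decide ¬((cb == c) = true)) := by
    apply List.countP_congr
    intro x _
    by_cases hx : x = c
    · simp [hx, bne]
    · simp [hx, bne]
      exact fun h => hx h.symm
  rw [heq]
  omega

-- the row-0 fill loop: sets positions a.toNat.. of the first row to 1
theorem pv_fill_row (k : Int) : ∀ (m : Nat) (a : Int) (r : List Int) (rest : List (List Int)),
    0 ≤ a → (k - a).toNat = m → r.length = k.toNat →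
    (PySem.List.pyRange a k 1).foldl (fun dp cor => pvSetCell dp 0 cor.toNat 1) (r :: rest)
    = (r.take a.toNat ++ List.replicate (k.toNat - a.toNat) 1) :: rest := by
  intro m
  induction m with
  | zero =>
    intro a r rest ha hm hr
    have hka : k ≤ a := by omega
    have h1 : a.toNat ≥ r.length := by omega
    rw [PySem.List.pyRange_one_eq_nil hka]
    simp [List.take_of_length_le h1, show k.toNat - a.toNat = 0 by omega]
  | succ m ih =>
    intro a r rest ha hm hr
    have hak : a < k := by omega
    rw [PySem.List.pyRange_one_cons hak]
    have hstep : pvSetCell (r :: rest) 0 a.toNat 1 = (r.set a.toNat 1) :: rest := by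
      simp [pvSetCell]
    simp only [List.foldl_cons, hstep]
    rw [ih (a+1) (r.set a.toNat 1) rest (by omega) (by omega) (by simp [hr])]
    have hj : a.toNat < r.length := by omega
    have h1 : (a+1).toNat = a.toNat + 1 := by omega
    rw [h1, pv_take_set_succ r a.toNat 1 hj]
    have h2 : k.toNat - a.toNat = (k.toNat - (a.toNat+1)) + 1 := by omega
    rw [h2, List.replicate_succ]
    simp

-- the innermost loop: adds v for every cb ≠ c to cell (I, c.toNat)
theorem pv_inner (c v : Int) (I P : Nat) (hPI : P ≠ I) :
    ∀ (cbs : List Int) (dp : List (List Int)),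
    I < dp.length → c.toNat < (dp.getD I []).length →
    (∀ cb ∈ cbs, pvGetCell dp P cb.toNat = v) →
    cbs.foldl (fun dp cb => if c ≠ cb then
        pvSetCell dp I c.toNat (pvGetCell dp I c.toNat + pvGetCell dp P cb.toNat)
      else dp) dp
    = pvSetCell dp I c.toNat (pvGetCell dp I c.toNat + (cbs.countP (fun cb => c != cb) : Int) * v) := by
  intro cbs
  induction cbs with
  | nil =>
    intro dp hI hc _
    have hrow : (dp.getD I []).set c.toNat (pvGetCell dp I c.toNat) = dp.getD I [] := by
      unfold pvGetCell
      rw [List.getD_eq_getElem _ _ hc]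
      exact List.set_getElem_self hc
    simp only [List.foldl_nil, List.countP_nil, Nat.cast_zero, zero_mul, add_zero]
    unfold pvSetCell
    rw [hrow, pv_set_getD_self _ _ hI]
  | cons cb cbs ih =>
    intro dp hI hc hprev
    by_cases hne : c ≠ cb
    · have hv : pvGetCell dp P cb.toNat = v := hprev cb (by simp)
      simp only [List.foldl_cons, if_pos hne, hv]
      set dp' := pvSetCell dp I c.toNat (pvGetCell dp I c.toNat + v) with hdp'
      have hI' : I < dp'.length := by rw [hdp', pv_length_setCell]; exact hI
      have hrowlen : (dp'.getD I []).length = (dp.getD I []).length := by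
        rw [hdp', pv_getD_setCell_self _ _ _ _ hI]; simp
      rw [ih dp' hI' (by omega)
        (fun x hx => by rw [hdp', pv_getCell_setCell_ne_row _ _ _ _ _ _ hPI]; exact hprev x (by simp [hx]))]
      rw [hdp', pv_getCell_setCell_self _ _ _ _ hI hc,
        pv_setCell_setCell _ _ _ _ _ hI]
      have hcnt : (cb :: cbs).countP (fun x => c != x) = cbs.countP (fun x => c != x) + 1 := by
        rw [List.countP_cons]; simp [bne_iff_ne, hne]
      rw [hcnt]
      push_cast
      ring_nf
    · rw [not_ne_iff] at hne
      simp only [List.foldl_cons, if_neg (not_not_intro hne)]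
      rw [ih dp hI hc (fun x hx => hprev x (by simp [hx]))]
      have hcnt : (cb :: cbs).countP (fun x => c != x) = cbs.countP (fun x => c != x) := by
        rw [List.countP_cons]; simp [hne]
      rw [hcnt]

theorem pv_getD_set_ne' (r : List Int) (n j : Nat) (w : Int) (h : j ≠ n) :
    (r.set n w).getD j 0 = r.getD j 0 := by
  simp [List.getD, List.getElem?_set_ne (Ne.symm h)]

-- the middle loop: row I goes from zeros (at positions ≥ a) to (k-1)*v everywhere
theorem pv_middle (k v : Int) (I P : Nat) (hPI : P ≠ I) :
    ∀ (m : Nat) (a : Int) (r : List Int) (dp : List (List Int)),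
    0 ≤ a → (k - a).toNat = m →
    I < dp.length → dp.getD I [] = r → r.length = k.toNat →
    (∀ j, a.toNat ≤ j → j < k.toNat → r.getD j 0 = 0) →
    (∀ cb : Int, 0 ≤ cb → cb < k → pvGetCell dp P cb.toNat = v) →
    (PySem.List.pyRange a k 1).foldl (fun dp ca =>
      (PySem.List.pyRange 0 k 1).foldl (fun dp cb => if ca ≠ cb then
          pvSetCell dp I ca.toNat (pvGetCell dp I ca.toNat + pvGetCell dp P cb.toNat)
        else dp) dp) dp
    = dp.set I (r.take a.toNat ++ List.replicate (k.toNat - a.toNat) ((k-1)*v)) := by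
  intro m
  induction m with
  | zero =>
    intro a r dp ha hm hI hrow hr _ _
    have hka : k ≤ a := by omega
    rw [PySem.List.pyRange_one_eq_nil hka]
    simp only [List.foldl_nil]
    rw [List.take_of_length_le (by omega), show k.toNat - a.toNat = 0 by omega]
    simp only [List.replicate_zero, List.append_nil]
    rw [← hrow, pv_set_getD_self _ _ hI]
  | succ m ih =>
    intro a r dp ha hm hI hrow hr hzero hv
    have hak : a < k := by omega
    rw [PySem.List.pyRange_one_cons hak]
    simp only [List.foldl_cons]
    rw [pv_inner a v I P hPI (PySem.List.pyRange 0 k 1) dp hI (by rw [hrow]; omega)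
      (fun cb hcb => by
        rw [PySem.List.mem_pyRange_one] at hcb
        exact hv cb hcb.1 hcb.2)]
    have hg : pvGetCell dp I a.toNat = 0 := by
      unfold pvGetCell
      rw [hrow]
      exact hzero a.toNat (le_refl _) (by omega)
    have hcnt : ((PySem.List.pyRange 0 k 1).countP (fun cb => a != cb) : Int) = k - 1 :=
      pv_countP_ne k a ha hak
    rw [hg, hcnt, zero_add]
    set w : Int := (k - 1) * v with hw
    have hsc : pvSetCell dp I a.toNat w = dp.set I (r.set a.toNat w) := by
      unfold pvSetCell; rw [hrow]
    rw [hsc]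
    have hI1 : I < (dp.set I (r.set a.toNat w)).length := by simpa using hI
    rw [ih (a+1) (r.set a.toNat w) _ (by omega) (by omega) hI1
      (pv_getD_set_self _ _ _ hI)
      (by simp [hr])
      (fun j hj1 hj2 => by
        rw [pv_getD_set_ne' _ _ _ _ (by omega)]
        exact hzero j (by omega) hj2)
      (fun cb hcb1 hcb2 => by
        have : dp.set I (r.set a.toNat w) = pvSetCell dp I a.toNat w := hsc.symm
        rw [this, pv_getCell_setCell_ne_row _ _ _ _ _ _ hPI]
        exact hv cb hcb1 hcb2)]
    rw [List.set_set]
    have h1 : (a+1).toNat = a.toNat + 1 := by omega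
    rw [h1, pv_take_set_succ r a.toNat w (by omega)]
    have h2 : k.toNat - a.toNat = (k.toNat - (a.toNat+1)) + 1 := by omega
    rw [h2, List.replicate_succ]
    simp

-- the dp matrix after the first m rows are finished
def pvRows (n k : Int) (m : Nat) : List (List Int) :=
  (List.range n.toNat).map (fun j =>
    if j < m then List.replicate k.toNat ((k-1)^j) else List.replicate k.toNat 0)

theorem pvRows_length (n k : Int) (m : Nat) : (pvRows n k m).length = n.toNat := by
  simp [pvRows]

theorem pvRows_getD (n k : Int) (m j : Nat) (h : j < n.toNat) :
    (pvRows n k m).getD j []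
    = if j < m then List.replicate k.toNat ((k-1)^j) else List.replicate k.toNat 0 := by
  rw [List.getD_eq_getElem _ _ (by simpa [pvRows] using h)]
  simp [pvRows]

theorem pvRows_set_succ (n k : Int) (m : Nat) (h : m < n.toNat) :
    (pvRows n k m).set m (List.replicate k.toNat ((k-1)^m)) = pvRows n k (m+1) := by
  apply List.ext_getElem
  · simp [pvRows]
  · intro j hj1 hj2
    by_cases hjm : j = m
    · subst hjm
      rw [List.getElem_set_self (by simpa [pvRows] using h)]
      simp [pvRows, h]
    · rw [List.getElem_set_ne (Ne.symm hjm)]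
      have hjn : j < n.toNat := by simpa [pvRows] using hj2
      simp only [pvRows, List.getElem_map, List.getElem_range]
      by_cases hlt : j < m
      · rw [if_pos hlt, if_pos (by omega)]
      · rw [if_neg hlt, if_neg (by omega)]

theorem pv_outer (n k : Int) (hk : 1 ≤ k) :
    ∀ (fuel : Nat) (m : Int) (dp : List (List Int)), 1 ≤ m → m ≤ n → (n - m).toNat = fuel →
    dp = pvRows n k m.toNat →
    (PySem.List.pyRange m n 1).foldl (fun dp i =>
      (PySem.List.pyRange 0 k 1).foldl (fun dp cor_atual =>
        (PySem.List.pyRange 0 k 1).foldl (fun dp cor_anterior =>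
          if cor_atual ≠ cor_anterior then
            pvSetCell dp i.toNat cor_atual.toNat
              (pvGetCell dp i.toNat cor_atual.toNat +
               pvGetCell dp (i - 1).toNat cor_anterior.toNat)
          else dp) dp) dp) dp
    = pvRows n k n.toNat := by
  intro fuel
  induction fuel with
  | zero =>
    intro m dp hm1 hmn hfuel hdp
    have : m = n := by omega
    subst this
    rw [PySem.List.pyRange_one_eq_nil (le_refl m)]
    simpa using hdp
  | succ fuel ih =>
    intro m dp hm1 hmn hfuel hdp
    have hmn' : m < n := by omega
    rw [PySem.List.pyRange_one_cons hmn']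
    simp only [List.foldl_cons]
    set I : Nat := m.toNat with hI
    have hI1 : 1 ≤ I := by omega
    have hIn : I < n.toNat := by omega
    have hP : (m - 1).toNat = I - 1 := by omega
    have hPI : I - 1 ≠ I := by omega
    set v : Int := (k-1)^(I-1) with hv
    have hmid := pv_middle k v I (I-1) hPI k.toNat 0 (List.replicate k.toNat 0) dp
      (le_refl 0) (by omega)
      (by rw [hdp, pvRows_length]; exact hIn)
      (by rw [hdp, pvRows_getD _ _ _ _ hIn]; simp)
      (by simp)
      (fun j _ hj => by simp)
      (fun cb hcb1 hcb2 => by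
        rw [hdp]
        unfold pvGetCell
        rw [pvRows_getD _ _ _ _ (by omega)]
        rw [if_pos (by omega)]
        rw [List.getD_eq_getElem _ _ (by simp; omega)]
        simp
        exact hv.symm)
    rw [hP, hmid]
    have hval : (k-1) * v = (k-1)^I := by
      rw [hv, ← pow_succ']
      congr 1
      omega
    rw [hval]
    simp only [Int.toNat_zero, List.take_zero, Nat.sub_zero, List.nil_append]
    rw [hdp, pvRows_set_succ n k I hIn]
    exact ih (m+1) _ (by omega) (by omega) (by omega) (by rw [show (m+1).toNat = I + 1 by omega])

theorem pv_foldl_add_replicate : ∀ (K : Nat) (x s : Int),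
    (List.replicate K x).foldl (· + ·) s = s + K * x := by
  intro K
  induction K with
  | zero => intro x s; simp
  | succ K ih =>
    intro x s
    rw [List.replicate_succ, List.foldl_cons, ih]
    push_cast
    ring

theorem main_lemma : ∀ (n k : Int), 1 ≤ n →
    calcular_combinacoes_pinturas n k = calcular_combinacoes_pinturas_alt n k := by
  intro n k hn
  unfold calcular_combinacoes_pinturas calcular_combinacoes_pinturas_alt
  simp only []
  by_cases hk : k ≤ 0
  · -- no colours: every row is [], all loops over range(n_cores) are empty
    rw [if_pos hk, PySem.List.pyRange_one_eq_nil hk]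
    simp only [List.map_nil, List.foldl_nil]
    have hmap : (PySem.List.pyRange 0 n 1).map (fun _ => ([] : List Int))
        = List.replicate n.toNat [] := by
      rw [List.map_const']
      congr 1
      simpa using PySem.List.length_pyRange_one 0 n
    rw [hmap]
    have hfix : ∀ (l : List Int) (dp : List (List Int)),
        l.foldl (fun dp (_ : Int) => dp) dp = dp := by
      intro l
      induction l with
      | nil => intro dp; rfl
      | cons x l ih => intro dp; rw [List.foldl_cons]; exact ih dp
    rw [hfix]
    by_cases hin : (n - 1).toNat < n.toNat
    · rw [List.getD_eq_getElem _ _ (by simpa using hin)]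
      simp
    · rw [List.getD_eq_default _ _ (by simp; omega)]
      simp
  · rw [if_neg hk]
    have hk1 : 1 ≤ k := by omega
    have hinner : (PySem.List.pyRange 0 k 1).map (fun _ => (0 : Int))
        = List.replicate k.toNat 0 := by
      rw [List.map_const']
      congr 1
      simpa using PySem.List.length_pyRange_one 0 k
    have houter : (PySem.List.pyRange 0 n 1).map
          (fun _ => (PySem.List.pyRange 0 k 1).map (fun _ => (0 : Int)))
        = List.replicate k.toNat 0 :: List.replicate (n.toNat - 1) (List.replicate k.toNat 0) := by
      simp only [hinner]
      rw [List.map_const']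
      have h1 : (PySem.List.pyRange 0 n 1).length = n.toNat := by
        simpa using PySem.List.length_pyRange_one 0 n
      rw [h1, show n.toNat = (n.toNat - 1) + 1 by omega, List.replicate_succ]
      simp
    rw [houter]
    rw [pv_fill_row k k.toNat 0 _ _ (le_refl 0) (by omega) (by simp)]
    simp only [Int.toNat_zero, List.take_zero, Nat.sub_zero, List.nil_append]
    have hrows1 : (List.replicate k.toNat (1:Int))
          :: List.replicate (n.toNat - 1) (List.replicate k.toNat 0)
        = pvRows n k 1 := by
      unfold pvRows
      rw [show n.toNat = (n.toNat - 1) + 1 by omega, List.range_succ_eq_map]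
      rw [List.map_cons, List.map_map]
      rw [if_pos (by omega)]
      simp only [pow_zero]
      congr 1
      have : ((fun j => if j < 1 then List.replicate k.toNat ((k-1)^j)
          else List.replicate k.toNat (0:Int)) ∘ (· + 1))
          = (fun _ => List.replicate k.toNat (0:Int)) := by
        funext j
        simp
      rw [this, List.map_const']
      simp
    rw [hrows1]
    rw [pv_outer n k hk1 (n - 1).toNat 1 _ (le_refl 1) hn (by omega) (by norm_num)]
    have hgd : (pvRows n k n.toNat).getD (n - 1).toNat []
        = List.replicate k.toNat ((k-1)^((n-1).toNat)) := by
      rw [pvRows_getD _ _ _ _ (by omega)]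
      rw [if_pos (by omega)]
    rw [hgd, pv_foldl_add_replicate, zero_add]
    congr 1
    omega

-- ===== VERDICT (by name: the statement is the Claim_ definition above) =====
theorem calcular_combinacoes_pinturas_spec : Claim_equal_calcular_combinacoes_pinturas := by
  intro n k _ hpre
  exact main_lemma n k hpre
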